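-- pv_equiv track=rewrite | github.com/malcolmzawacki/AoC2024 | day19.py | full_count
-- ===== SOURCE A (Python) =====
-- def constructLengthDictionary(patterns, lengthDictionary):
--     for item in patterns:
--         length = len(item)  # use integer
--         if length not in lengthDictionary:  # compare with integer
--             lengthDictionary[length] = set([item])  # store with integer key
--         else:
--             lengthDictionary[length].add(item)
--     return lengthDictionary
--
-- def can_construct(test_str, length_dict, memo=None):
--     if memo is None:
--         memo = {}
--     if test_str in memo:
--         return memo[test_str]
--     if not test_str:  # Empty string means we successfully used everything
--         return True
--     # Try each possible prefix
--     for length in length_dict: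
--         if len(test_str) < length:
--             continue
--         prefix = test_str[:length]
--         if prefix in length_dict[length]:
--             # If this prefix works, recursively try to build the rest
--             if can_construct(test_str[length:], length_dict, memo):
--                 memo[test_str] = True
--                 return True
--     memo[test_str] = False
--     return False
--
-- def count_constructions(test_str, length_dict, memo=None):
--     if memo is None:
--         memo = {}
--     if test_str in memo:
--         return memo[test_str]
--     if not test_str:  # Empty string means we found one valid path
--         return 1
--
--     total_ways = 0
--     # Try each possible prefix
--     for length in length_dict:
--         if len(test_str) < length:
--             continue
--         prefix = test_str[:length]
--         if prefix in length_dict[length]: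
--             # Add the number of ways to construct the remaining string
--             total_ways += count_constructions(test_str[length:], length_dict, memo)
--
--     memo[test_str] = total_ways
--     return total_ways
--
-- def full_count(patterns,requests):
--     lengthDictionary = constructLengthDictionary(patterns,{})
--     count = 0
--     total = 0
--     for request in requests:
--         check = can_construct(request, lengthDictionary, memo=None)
--         if check == True:
--             count+=1
--             total+=count_constructions(request, lengthDictionary, memo=None)
--     return count, total
-- ===== SOURCE B (Python) =====
-- def full_count(patterns, requests):
--     pats = set(patterns)
--     lengths = sorted({len(p) for p in patterns if p})
--     count = 0
--     total = 0
--     for request in requests: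
--         n = len(request)
--         dp = [0] * (n + 1)
--         dp[n] = 1
--         for i in range(n - 1, -1, -1):
--             dp[i] = sum(dp[i + L] for L in lengths if i + L <= n and request[i:i + L] in pats)
--         if dp[0] > 0:
--             count += 1
--             total += dp[0]
--     return count, total
-- ===== Notes on version B (the rewrite author's own statement) =====
-- stated objective: alternative
-- what changed: B replaces A's two recursive memoized passes per request (can_construct, then count_constructions) by a single bottom-up DP array dp of size n+1 filled from the right, whose entry dp[0] serves both as the constructibility test and as the arrangement count.
import Mathlib
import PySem

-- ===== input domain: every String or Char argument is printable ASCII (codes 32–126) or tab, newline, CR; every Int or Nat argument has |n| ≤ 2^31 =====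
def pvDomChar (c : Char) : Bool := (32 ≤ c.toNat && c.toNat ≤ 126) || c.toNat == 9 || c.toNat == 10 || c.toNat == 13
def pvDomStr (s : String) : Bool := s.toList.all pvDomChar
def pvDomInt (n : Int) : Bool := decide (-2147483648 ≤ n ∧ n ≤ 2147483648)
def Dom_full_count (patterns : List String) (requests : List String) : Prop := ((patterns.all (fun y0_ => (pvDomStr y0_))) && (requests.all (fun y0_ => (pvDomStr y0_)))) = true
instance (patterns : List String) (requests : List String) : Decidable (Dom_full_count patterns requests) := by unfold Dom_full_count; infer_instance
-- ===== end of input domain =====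

-- B replaces A's two recursive memoized passes (can_construct + count_constructions) by one
-- bottom-up DP table per request whose entry dp[0] serves as both the test and the count (objective: alternative).

-- ===== PORT A =====
def constructLengthDictionary (patterns : List String)
    (lengthDictionary : PySem.Dict Int (PySem.Set String)) : PySem.Dict Int (PySem.Set String) :=
  patterns.foldl (fun d item =>
    let length : Int := PySem.Str.len item
    if d.contains length = false then d.insert length (PySem.Set.ofList [item])
    else d.modify length PySem.Set.empty (fun s => PySem.Set.add s item)) lengthDictionary

mutual
-- can_construct; the Nat fuel only makes the recursion structural (on admitted inputs it is never exhausted)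
def can_construct (ld : PySem.Dict Int (PySem.Set String)) (fuel : Nat) (s : String)
    (memo : PySem.Dict String Bool) : Bool × PySem.Dict String Bool :=
  match fuel with
  | 0 => (false, memo)
  | fuel' + 1 =>
    match memo.get? s with
    | some b => (b, memo)
    | none =>
      if s = "" then (true, memo)
      else can_go ld fuel' ld.keys s memo
termination_by (fuel, 0)
-- the `for length in length_dict:` loop of can_construct
def can_go (ld : PySem.Dict Int (PySem.Set String)) (fuel : Nat) (ks : List Int) (s : String)
    (memo : PySem.Dict String Bool) : Bool × PySem.Dict String Bool :=
  match ks with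
  | [] => (false, memo.insert s false)
  | length :: rest =>
    if PySem.Str.len s < length then can_go ld fuel rest s memo
    else
      if (ld.getD length PySem.Set.empty).contains (PySem.Str.slice s none (some length)) then
        let r := can_construct ld fuel (PySem.Str.slice s (some length) none) memo
        if r.1 then (true, r.2.insert s true)
        else can_go ld fuel rest s r.2
      else can_go ld fuel rest s memo
termination_by (fuel, ks.length + 1)
end

mutual
-- count_constructions; same fuel device
def count_constructions (ld : PySem.Dict Int (PySem.Set String)) (fuel : Nat) (s : String)
    (memo : PySem.Dict String Int) : Int × PySem.Dict String Int :=
  match fuel with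
  | 0 => (0, memo)
  | fuel' + 1 =>
    match memo.get? s with
    | some v => (v, memo)
    | none =>
      if s = "" then (1, memo)
      else count_go ld fuel' ld.keys s 0 memo
termination_by (fuel, 0)
-- the `for length in length_dict:` loop of count_constructions, acc = total_ways
def count_go (ld : PySem.Dict Int (PySem.Set String)) (fuel : Nat) (ks : List Int) (s : String)
    (acc : Int) (memo : PySem.Dict String Int) : Int × PySem.Dict String Int :=
  match ks with
  | [] => (acc, memo.insert s acc)
  | length :: rest =>
    if PySem.Str.len s < length then count_go ld fuel rest s acc memo
    else
      if (ld.getD length PySem.Set.empty).contains (PySem.Str.slice s none (some length)) then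
        let r := count_constructions ld fuel (PySem.Str.slice s (some length) none) memo
        count_go ld fuel rest s (acc + r.1) r.2
      else count_go ld fuel rest s acc memo
termination_by (fuel, ks.length + 1)
end

def full_count (patterns : List String) (requests : List String) : Int × Int :=
  let lengthDictionary := constructLengthDictionary patterns PySem.Dict.empty
  requests.foldl (fun ct request =>
    let check := (can_construct lengthDictionary (request.toList.length + 1) request PySem.Dict.empty).1
    if check = true then
      (ct.1 + 1, ct.2 + (count_constructions lengthDictionary (request.toList.length + 1) request PySem.Dict.empty).1)
    else ct) (0, 0)

-- ===== PORT B =====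
-- the body of B's `for i in range(n-1,-1,-1)` loop: dp[i] = sum(dp[i+L] for L in lengths if i+L <= n and request[i:i+L] in pats)
def bStep (pats : PySem.Set String) (lengths : List Int) (n : Int) (request : String)
    (dp : List Int) (i : Int) : List Int :=
  PySem.List.pySetD dp i
    (((lengths.filter (fun L => decide (i + L ≤ n) &&
        pats.contains (PySem.Str.slice request (some i) (some (i + L))))).map
      (fun L => PySem.List.pyGetD dp (i + L) 0)).sum)

def full_count_alt (patterns : List String) (requests : List String) : Int × Int :=
  let pats : PySem.Set String := PySem.Set.ofList patterns
  let lengths : List Int :=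
    PySem.List.sorted (PySem.Set.ofList ((patterns.filter (fun p => !(p == ""))).map
      (fun p => PySem.Str.len p))) (fun x => x) false
  requests.foldl (fun ct request =>
    let n : Int := PySem.Str.len request
    let dp := (PySem.List.pyRange (n - 1) (-1) (-1)).foldl (bStep pats lengths n request)
      (PySem.List.pySetD (List.replicate (n.toNat + 1) 0) n 1)
    let w := PySem.List.pyGetD dp 0 0
    if 0 < w then (ct.1 + 1, ct.2 + w) else ct) (0, 0)

-- ===== PRECONDITION & SPEC =====
-- Pre_ excludes exactly the inputs where "" is a pattern and some request is nonempty: there A's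
-- helpers recurse on an unchanged suffix and raise RecursionError.
def Pre_full_count (patterns : List String) (requests : List String) : Prop :=
  "" ∈ patterns → ∀ r ∈ requests, r = ""
instance (patterns : List String) (requests : List String) : Decidable (Pre_full_count patterns requests) := by unfold Pre_full_count; infer_instance
def pvWitness_full_count : List String × List String := (["a", "ab"], ["aab", ""])

def Spec_full_count (patterns : List String) (requests : List String) (out : Int × Int) : Prop := out = full_count_alt patterns requests
instance (patterns : List String) (requests : List String) (out : Int × Int) : Decidable (Spec_full_count patterns requests out) := by unfold Spec_full_count; infer_instance

-- ===== CLAIM (what is proved, stated in full; the proofs are below) =====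
def Claim_equal_full_count : Prop := ∀ (patterns : List String) (requests : List String), Dom_full_count patterns requests → Pre_full_count patterns requests → Spec_full_count patterns requests (full_count patterns requests)
-- ===== LEMMAS AND PROOFS =====

-- the branch test of A's inner loops, as a predicate of the suffix s and a candidate length L
def condA (ld : PySem.Dict Int (PySem.Set String)) (s : String) (L : Int) : Bool :=
  !decide (PySem.Str.len s < L) &&
    (ld.getD L PySem.Set.empty).contains (PySem.Str.slice s none (some L))

-- the common mathematical value: number of decompositions of s into dictionary pieces, with fuel
def Wf (ld : PySem.Dict Int (PySem.Set String)) : Nat → String → Int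
  | 0, _ => 0
  | fuel + 1, s =>
    if s = "" then 1
    else (ld.keys.map (fun L =>
      if condA ld s L then Wf ld fuel (PySem.Str.slice s (some L) none) else 0)).sum

def Wc (ld : PySem.Dict Int (PySem.Set String)) (s : String) : Int :=
  Wf ld (s.toList.length + 1) s

lemma str_len_pos {s : String} (h : s ≠ "") : 0 < s.toList.length := by
  cases hs : s.toList with
  | nil => exact absurd (String.toList_inj.mp (by simp [hs])) h
  | cons a l => simp

-- memo invariants of A's two helpers
def goodB (ld : PySem.Dict Int (PySem.Set String)) (memo : PySem.Dict String Bool) : Prop :=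
  ∀ k b, memo.get? k = some b → b = decide (0 < Wc ld k)

def goodI (ld : PySem.Dict Int (PySem.Set String)) (memo : PySem.Dict String Int) : Prop :=
  ∀ k v, memo.get? k = some v → v = Wc ld k

-- the sum A's inner loop still has to add, over the unprocessed keys
def Sr (ld : PySem.Dict Int (PySem.Set String)) (rest : List Int) (s : String) : Int :=
  (rest.map (fun L => if condA ld s L then Wc ld (PySem.Str.slice s (some L) none) else 0)).sum

lemma toList_slice_from (s : String) {L : Int} (h : 0 ≤ L) :
    (PySem.Str.slice s (some L) none).toList = s.toList.drop L.toNat := by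
  simp [PySem.Str.toList_slice, PySem.Chars.slice_eq_listSlice, PySem.List.slice_from _ h]

lemma toList_slice_to (s : String) {L : Int} (h : 0 ≤ L) :
    (PySem.Str.slice s none (some L)).toList = s.toList.take L.toNat := by
  simp [PySem.Str.toList_slice, PySem.Chars.slice_eq_listSlice, PySem.List.slice_to _ h]

lemma condA_spec {ld : PySem.Dict Int (PySem.Set String)} {s : String} {L : Int}
    (h : condA ld s L = true) :
    L ≤ (s.toList.length : Int) ∧
      (ld.getD L PySem.Set.empty).contains (PySem.Str.slice s none (some L)) = true := by
  unfold condA at h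
  rw [Bool.and_eq_true] at h
  refine ⟨?_, h.2⟩
  have := h.1
  rw [Bool.not_eq_true', decide_eq_false_iff_not, PySem.Str.len_eq] at this
  omega

lemma slice_len_lt {s : String} {L : Int} (hs : s ≠ "") (h1 : 1 ≤ L) :
    (PySem.Str.slice s (some L) none).toList.length < s.toList.length := by
  rw [toList_slice_from s (by omega)]
  have h0 := str_len_pos hs
  rw [List.length_drop]
  omega

-- ---- the length dictionary built by constructLengthDictionary ----

lemma build_step (a : String) (l : List String) (d : PySem.Dict Int (PySem.Set String)) :
    constructLengthDictionary (a :: l) d =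
      constructLengthDictionary l
        (if d.contains (PySem.Str.len a) = false then
            d.insert (PySem.Str.len a) (PySem.Set.ofList [a])
          else d.modify (PySem.Str.len a) PySem.Set.empty (fun s => PySem.Set.add s a)) := by
  simp [constructLengthDictionary]

lemma contains_false_getD {d : PySem.Dict Int (PySem.Set String)} {L : Int}
    (h : d.contains L = false) : d.getD L PySem.Set.empty = PySem.Set.empty := by
  rw [PySem.Dict.contains_eq_isSome_get?] at h
  unfold PySem.Dict.getD
  cases hg : d.get? L
  · rfl
  · rw [hg] at h; simp at h

lemma step_getD_mem (a : String) (d : PySem.Dict Int (PySem.Set String)) (L : Int) (p : String) :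
    p ∈ (if d.contains (PySem.Str.len a) = false then
            d.insert (PySem.Str.len a) (PySem.Set.ofList [a])
          else d.modify (PySem.Str.len a) PySem.Set.empty (fun s => PySem.Set.add s a)).getD L
        PySem.Set.empty ↔
      p ∈ d.getD L PySem.Set.empty ∨ (p = a ∧ PySem.Str.len a = L) := by
  by_cases hc : d.contains (PySem.Str.len a) = false
  · rw [if_pos hc]
    by_cases hL : L = PySem.Str.len a
    · subst hL
      rw [PySem.Dict.getD_insert_self, contains_false_getD hc, PySem.Set.mem_ofList]
      simp [PySem.Set.empty]
    · rw [PySem.Dict.getD_insert, if_neg hL]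
      constructor
      · exact Or.inl
      · rintro (h | ⟨rfl, h2⟩)
        · exact h
        · exact absurd h2 (fun h => hL h.symm)
  · rw [if_neg hc]
    unfold PySem.Dict.modify
    by_cases hL : L = PySem.Str.len a
    · subst hL
      rw [PySem.Dict.getD_insert_self, PySem.Set.mem_add]
      constructor
      · rintro (h | rfl)
        · exact Or.inl h
        · exact Or.inr ⟨rfl, rfl⟩
      · rintro (h | ⟨rfl, _⟩)
        · exact Or.inl h
        · exact Or.inr rfl
    · rw [PySem.Dict.getD_insert, if_neg hL]
      constructor
      · exact Or.inl
      · rintro (h | ⟨rfl, h2⟩)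
        · exact h
        · exact absurd h2 (fun h => hL h.symm)

lemma build_getD_mem (l : List String) :
    ∀ (d : PySem.Dict Int (PySem.Set String)) (L : Int) (p : String),
    p ∈ (constructLengthDictionary l d).getD L PySem.Set.empty ↔
      p ∈ d.getD L PySem.Set.empty ∨ (p ∈ l ∧ PySem.Str.len p = L) := by
  induction l with
  | nil => intro d L p; simp [constructLengthDictionary]
  | cons a l ih =>
    intro d L p
    rw [build_step, ih, step_getD_mem]
    constructor
    · rintro ((h | ⟨rfl, h2⟩) | ⟨h1, h2⟩)
      · exact Or.inl h
      · exact Or.inr ⟨by simp, h2⟩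
      · exact Or.inr ⟨by simp [h1], h2⟩
    · rintro (h | ⟨h1, h2⟩)
      · exact Or.inl (Or.inl h)
      · rcases List.mem_cons.mp h1 with rfl | h1
        · exact Or.inl (Or.inr ⟨rfl, h2⟩)
        · exact Or.inr ⟨h1, h2⟩

lemma contains_true_of_not_false {d : PySem.Dict Int (PySem.Set String)} {L : Int}
    (h : ¬ d.contains L = false) : d.contains L = true := by
  revert h; cases d.contains L <;> simp

lemma step_keys_mem (a : String) (d : PySem.Dict Int (PySem.Set String)) (L : Int) :
    L ∈ (if d.contains (PySem.Str.len a) = false then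
            d.insert (PySem.Str.len a) (PySem.Set.ofList [a])
          else d.modify (PySem.Str.len a) PySem.Set.empty (fun s => PySem.Set.add s a)).keys ↔
      L ∈ d.keys ∨ L = PySem.Str.len a := by
  by_cases hc : d.contains (PySem.Str.len a) = false
  · rw [if_pos hc, PySem.Dict.keys_insert_of_not_contains d _ hc]
    simp
  · rw [if_neg hc]
    unfold PySem.Dict.modify
    rw [PySem.Dict.keys_insert_of_contains d _ (contains_true_of_not_false hc)]
    have hmem : PySem.Str.len a ∈ d.keys :=
      (PySem.Dict.contains_iff_mem_keys d _).mp (contains_true_of_not_false hc)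
    constructor
    · exact Or.inl
    · rintro (h | rfl)
      · exact h
      · exact hmem

lemma build_mem_keys (l : List String) :
    ∀ (d : PySem.Dict Int (PySem.Set String)) (L : Int),
    L ∈ (constructLengthDictionary l d).keys ↔
      L ∈ d.keys ∨ ∃ p ∈ l, PySem.Str.len p = L := by
  induction l with
  | nil => intro d L; simp [constructLengthDictionary]
  | cons a l ih =>
    intro d L
    rw [build_step, ih, step_keys_mem]
    constructor
    · rintro ((h | rfl) | ⟨p, hp, hpl⟩)
      · exact Or.inl h
      · exact Or.inr ⟨a, by simp, rfl⟩
      · exact Or.inr ⟨p, by simp [hp], hpl⟩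
    · rintro (h | ⟨p, hp, hpl⟩)
      · exact Or.inl (Or.inl h)
      · rcases List.mem_cons.mp hp with rfl | hp
        · exact Or.inl (Or.inr hpl.symm)
        · exact Or.inr ⟨p, hp, hpl⟩

lemma build_nodup (l : List String) :
    ∀ (d : PySem.Dict Int (PySem.Set String)), d.keys.Nodup →
    (constructLengthDictionary l d).keys.Nodup := by
  induction l with
  | nil => intro d hd; simpa [constructLengthDictionary] using hd
  | cons a l ih =>
    intro d hd
    rw [build_step]
    by_cases hc : d.contains (PySem.Str.len a) = false
    · rw [if_pos hc]
      apply ih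
      rw [PySem.Dict.keys_insert_of_not_contains d _ hc]
      have : PySem.Str.len a ∉ d.keys := by
        intro h
        rw [← PySem.Dict.contains_iff_mem_keys] at h
        rw [h] at hc; simp at hc
      rw [List.nodup_append]
      refine ⟨hd, List.nodup_singleton _, ?_⟩
      intro x hx y hy
      rw [List.mem_singleton] at hy
      subst hy
      exact fun h => this (h ▸ hx)
    · rw [if_neg hc]
      apply ih
      unfold PySem.Dict.modify
      rw [PySem.Dict.keys_insert_of_contains d _ (contains_true_of_not_false hc)]
      exact hd

lemma empty_keys : (PySem.Dict.empty : PySem.Dict Int (PySem.Set String)).keys = [] := rfl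

lemma ld_getD_mem (patterns : List String) (L : Int) (p : String) :
    p ∈ (constructLengthDictionary patterns PySem.Dict.empty).getD L PySem.Set.empty ↔
      p ∈ patterns ∧ PySem.Str.len p = L := by
  rw [build_getD_mem]
  have : (PySem.Dict.empty : PySem.Dict Int (PySem.Set String)).getD L PySem.Set.empty = PySem.Set.empty := rfl
  rw [this]
  simp [PySem.Set.empty]

lemma ld_mem_keys (patterns : List String) (L : Int) :
    L ∈ (constructLengthDictionary patterns PySem.Dict.empty).keys ↔
      ∃ p ∈ patterns, PySem.Str.len p = L := by
  rw [build_mem_keys, empty_keys]; simp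

lemma ld_keys_nodup (patterns : List String) :
    (constructLengthDictionary patterns PySem.Dict.empty).keys.Nodup := by
  apply build_nodup
  rw [empty_keys]; exact List.nodup_nil

lemma ld_keys_pos (patterns : List String) (hP : "" ∉ patterns) :
    ∀ L ∈ (constructLengthDictionary patterns PySem.Dict.empty).keys, 1 ≤ L := by
  intro L hL
  obtain ⟨p, hp, rfl⟩ := (ld_mem_keys patterns L).mp hL
  have : p ≠ "" := fun h => hP (h ▸ hp)
  have := str_len_pos this
  rw [PySem.Str.len_eq]
  omega

-- ---- generic facts about Wf / Wc ----

lemma Wf_nonneg (ld : PySem.Dict Int (PySem.Set String)) :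
    ∀ (fuel : Nat) (s : String), 0 ≤ Wf ld fuel s := by
  intro fuel
  induction fuel with
  | zero => intro s; simp [Wf]
  | succ f ih =>
    intro s
    by_cases h : s = ""
    · simp [Wf, h]
    · simp only [Wf, h, if_false]
      apply List.sum_nonneg
      intro x hx
      simp only [List.mem_map] at hx
      obtain ⟨L, _, rfl⟩ := hx
      split
      · exact ih _
      · exact le_refl 0

lemma Wc_nonneg (ld : PySem.Dict Int (PySem.Set String)) (s : String) : 0 ≤ Wc ld s :=
  Wf_nonneg ld _ s

lemma Wf_congr (ld : PySem.Dict Int (PySem.Set String)) (hpos : ∀ L ∈ ld.keys, 1 ≤ L) :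
    ∀ (fuel g : Nat) (s : String), s.toList.length < fuel → s.toList.length < g →
      Wf ld fuel s = Wf ld g s := by
  intro fuel
  induction fuel with
  | zero => intro g s h; omega
  | succ f ih =>
    intro g s hf hg
    cases g with
    | zero => omega
    | succ g' =>
      by_cases h : s = ""
      · simp [Wf, h]
      · simp only [Wf, h, if_false]
        congr 1
        apply List.map_congr_left
        intro L hL
        by_cases hA : condA ld s L = true
        · simp only [hA, if_true]
          have h1 := hpos L hL
          have h2 := (condA_spec hA).1
          have hlt := slice_len_lt h h1
          exact ih g' _ (by omega) (by omega)
        · simp [hA]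

lemma Wc_empty (ld : PySem.Dict Int (PySem.Set String)) : Wc ld "" = 1 := rfl

lemma Wc_unfold (ld : PySem.Dict Int (PySem.Set String)) (hpos : ∀ L ∈ ld.keys, 1 ≤ L)
    {s : String} (h : s ≠ "") :
    Wc ld s = Sr ld ld.keys s := by
  unfold Wc Sr
  rw [show Wf ld (s.toList.length + 1) s = (ld.keys.map (fun L =>
      if condA ld s L then Wf ld s.toList.length (PySem.Str.slice s (some L) none) else 0)).sum
    from by simp only [Wf, h, if_false]]
  congr 1
  apply List.map_congr_left
  intro L hL
  by_cases hA : condA ld s L = true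
  · simp only [hA, if_true]
    have h1 := hpos L hL
    have hlt := slice_len_lt h h1
    exact Wf_congr ld hpos _ _ _ (by omega) (by omega)
  · simp [hA]

lemma sum_pos_iff (l : List Int) (h : ∀ x ∈ l, 0 ≤ x) :
    0 < l.sum ↔ ∃ x ∈ l, 0 < x := by
  induction l with
  | nil => simp
  | cons a l ih =>
    have ha := h a (by simp)
    have hs : 0 ≤ l.sum := List.sum_nonneg (fun x hx => h x (by simp [hx]))
    have ihl := ih (fun x hx => h x (by simp [hx]))
    simp only [List.sum_cons]
    constructor
    · intro hpos
      by_cases h0 : 0 < a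
      · exact ⟨a, by simp, h0⟩
      · have : 0 < l.sum := by omega
        obtain ⟨x, hx, hp⟩ := ihl.mp this
        exact ⟨x, by simp [hx], hp⟩
    · rintro ⟨x, hx, hp⟩
      rcases List.mem_cons.mp hx with rfl | hx
      · omega
      · have : 0 < l.sum := ihl.mpr ⟨x, hx, hp⟩
        omega

lemma Wc_pos_iff (ld : PySem.Dict Int (PySem.Set String)) (hpos : ∀ L ∈ ld.keys, 1 ≤ L)
    {s : String} (h : s ≠ "") :
    0 < Wc ld s ↔ ∃ L ∈ ld.keys, condA ld s L = true ∧
      0 < Wc ld (PySem.Str.slice s (some L) none) := by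
  rw [Wc_unfold ld hpos h]
  unfold Sr
  rw [sum_pos_iff]
  · constructor
    · rintro ⟨x, hx, hp⟩
      simp only [List.mem_map] at hx
      obtain ⟨L, hL, rfl⟩ := hx
      by_cases hA : condA ld s L = true
      · exact ⟨L, hL, hA, by simpa [hA] using hp⟩
      · simp [hA] at hp
    · rintro ⟨L, hL, hA, hp⟩
      exact ⟨_, List.mem_map.mpr ⟨L, hL, rfl⟩, by simpa [hA] using hp⟩
  · intro x hx
    simp only [List.mem_map] at hx
    obtain ⟨L, _, rfl⟩ := hx
    split
    · exact Wc_nonneg ld _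
    · exact le_refl 0

-- ---- A's can_construct computes (0 < Wc) ----

lemma goodB_insert {ld : PySem.Dict Int (PySem.Set String)} {memo : PySem.Dict String Bool}
    (hg : goodB ld memo) {s : String} {b : Bool} (hb : b = decide (0 < Wc ld s)) :
    goodB ld (memo.insert s b) := by
  intro k v hk
  by_cases hks : k = s
  · subst hks
    rw [PySem.Dict.get?_insert_self] at hk
    cases hk; exact hb
  · rw [PySem.Dict.get?_insert_of_ne _ _ hks] at hk
    exact hg k v hk

lemma can_go_spec (ld : PySem.Dict Int (PySem.Set String)) (hpos : ∀ L ∈ ld.keys, 1 ≤ L)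
    (fuel : Nat)
    (hcc : ∀ (s : String) (memo : PySem.Dict String Bool), goodB ld memo →
      s.toList.length < fuel →
      (can_construct ld fuel s memo).1 = decide (0 < Wc ld s) ∧
        goodB ld (can_construct ld fuel s memo).2) :
    ∀ (rest : List Int), (∀ L ∈ rest, L ∈ ld.keys) →
    ∀ (s : String) (memo : PySem.Dict String Bool), goodB ld memo → s ≠ "" →
      s.toList.length ≤ fuel →
      ((0 < Wc ld s) ↔ ∃ L ∈ rest, condA ld s L = true ∧
        0 < Wc ld (PySem.Str.slice s (some L) none)) →
      (can_go ld fuel rest s memo).1 = decide (0 < Wc ld s) ∧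
        goodB ld (can_go ld fuel rest s memo).2 := by
  intro rest
  induction rest with
  | nil =>
    intro _ s memo hg hs hlen hiff
    simp only [can_go]
    have hnpos : ¬ 0 < Wc ld s := by
      rw [hiff]; simp
    constructor
    · simp [hnpos]
    · exact goodB_insert hg (by simp [hnpos])
  | cons L rest ih =>
    intro hsub s memo hg hs hlen hiff
    have hLk := hsub L (by simp)
    have hL1 := hpos L hLk
    simp only [can_go]
    by_cases hlt : PySem.Str.len s < L
    · rw [if_pos hlt]
      apply ih (fun L' hL' => hsub L' (by simp [hL'])) s memo hg hs hlen
      rw [hiff]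
      constructor
      · rintro ⟨L', hL', hA, hp⟩
        rcases List.mem_cons.mp hL' with rfl | hL'
        · exfalso
          unfold condA at hA
          rw [Bool.and_eq_true, Bool.not_eq_true', decide_eq_false_iff_not] at hA
          exact hA.1 hlt
        · exact ⟨L', hL', hA, hp⟩
      · rintro ⟨L', hL', hA, hp⟩
        exact ⟨L', by simp [hL'], hA, hp⟩
    · rw [if_neg hlt]
      by_cases hcont : (ld.getD L PySem.Set.empty).contains (PySem.Str.slice s none (some L)) = true
      · rw [if_pos hcont]
        have hA : condA ld s L = true := by
          unfold condA
          rw [Bool.and_eq_true, Bool.not_eq_true', decide_eq_false_iff_not]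
          exact ⟨hlt, hcont⟩
        have hdrop := slice_len_lt hs hL1
        have hrec := hcc (PySem.Str.slice s (some L) none) memo hg (by omega)
        by_cases hr : (can_construct ld fuel (PySem.Str.slice s (some L) none) memo).1 = true
        · simp only [hr, if_true]
          have hp : 0 < Wc ld (PySem.Str.slice s (some L) none) := by
            rw [hrec.1] at hr; simpa using hr
          have hw : 0 < Wc ld s := hiff.mpr ⟨L, by simp, hA, hp⟩
          constructor
          · simp [hw]
          · exact goodB_insert hrec.2 (by simp [hw])
        · rw [Bool.not_eq_true] at hr
          rw [if_neg (by simp [hr])]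
          apply ih (fun L' hL' => hsub L' (by simp [hL'])) s _ hrec.2 hs hlen
          have hnp : ¬ 0 < Wc ld (PySem.Str.slice s (some L) none) := by
            rw [hrec.1] at hr
            simpa using hr
          rw [hiff]
          constructor
          · rintro ⟨L', hL', hA', hp⟩
            rcases List.mem_cons.mp hL' with rfl | hL'
            · exact absurd hp hnp
            · exact ⟨L', hL', hA', hp⟩
          · rintro ⟨L', hL', hA', hp⟩
            exact ⟨L', by simp [hL'], hA', hp⟩
      · rw [if_neg hcont]
        apply ih (fun L' hL' => hsub L' (by simp [hL'])) s memo hg hs hlen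
        have hA : condA ld s L = false := by
          unfold condA
          rw [Bool.and_eq_false_iff]
          right
          exact Bool.not_eq_true _ ▸ (by simpa using hcont)
        rw [hiff]
        constructor
        · rintro ⟨L', hL', hA', hp⟩
          rcases List.mem_cons.mp hL' with rfl | hL'
          · rw [hA'] at hA; cases hA
          · exact ⟨L', hL', hA', hp⟩
        · rintro ⟨L', hL', hA', hp⟩
          exact ⟨L', by simp [hL'], hA', hp⟩

lemma can_construct_spec (ld : PySem.Dict Int (PySem.Set String)) (hpos : ∀ L ∈ ld.keys, 1 ≤ L) :
    ∀ (fuel : Nat) (s : String) (memo : PySem.Dict String Bool), goodB ld memo →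
      s.toList.length < fuel →
      (can_construct ld fuel s memo).1 = decide (0 < Wc ld s) ∧
        goodB ld (can_construct ld fuel s memo).2 := by
  intro fuel
  induction fuel with
  | zero => intro s memo _ h; omega
  | succ f ih =>
    intro s memo hg hlen
    simp only [can_construct]
    cases hm : memo.get? s with
    | some b =>
      exact ⟨hg s b hm, hg⟩
    | none =>
      by_cases hs : s = ""
      · subst hs
        rw [if_pos rfl]
        exact ⟨by simp [Wc_empty], hg⟩
      · rw [if_neg hs]
        apply can_go_spec ld hpos f (fun s' memo' hg' hl' => ih s' memo' hg' hl')
          ld.keys (fun _ h => h) s memo hg hs (by have := str_len_pos hs; omega)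
        exact Wc_pos_iff ld hpos hs

-- ---- A's count_constructions computes Wc ----

lemma goodI_insert {ld : PySem.Dict Int (PySem.Set String)} {memo : PySem.Dict String Int}
    (hg : goodI ld memo) {s : String} {v : Int} (hv : v = Wc ld s) :
    goodI ld (memo.insert s v) := by
  intro k w hk
  by_cases hks : k = s
  · subst hks
    rw [PySem.Dict.get?_insert_self] at hk
    cases hk; exact hv
  · rw [PySem.Dict.get?_insert_of_ne _ _ hks] at hk
    exact hg k w hk

lemma count_go_spec (ld : PySem.Dict Int (PySem.Set String)) (hpos : ∀ L ∈ ld.keys, 1 ≤ L)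
    (fuel : Nat)
    (hcc : ∀ (s : String) (memo : PySem.Dict String Int), goodI ld memo →
      s.toList.length < fuel →
      (count_constructions ld fuel s memo).1 = Wc ld s ∧
        goodI ld (count_constructions ld fuel s memo).2) :
    ∀ (rest : List Int), (∀ L ∈ rest, L ∈ ld.keys) →
    ∀ (s : String) (acc : Int) (memo : PySem.Dict String Int), goodI ld memo → s ≠ "" →
      s.toList.length ≤ fuel →
      acc + Sr ld rest s = Wc ld s →
      (count_go ld fuel rest s acc memo).1 = Wc ld s ∧
        goodI ld (count_go ld fuel rest s acc memo).2 := by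
  intro rest
  induction rest with
  | nil =>
    intro _ s acc memo hg hs hlen hacc
    simp only [Sr, List.map_nil, List.sum_nil, add_zero] at hacc
    simp only [count_go]
    exact ⟨hacc, goodI_insert hg hacc⟩
  | cons L rest ih =>
    intro hsub s acc memo hg hs hlen hacc
    have hLk := hsub L (by simp)
    have hL1 := hpos L hLk
    have hSr : Sr ld (L :: rest) s =
        (if condA ld s L then Wc ld (PySem.Str.slice s (some L) none) else 0) + Sr ld rest s := by
      simp [Sr]
    simp only [count_go]
    by_cases hlt : PySem.Str.len s < L
    · rw [if_pos hlt]
      apply ih (fun L' hL' => hsub L' (by simp [hL'])) s acc memo hg hs hlen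
      have hA : condA ld s L = false := by
        unfold condA
        rw [Bool.and_eq_false_iff]
        left
        rw [decide_eq_true hlt]
        rfl
      rw [hSr, hA] at hacc
      simpa using hacc
    · rw [if_neg hlt]
      by_cases hcont : (ld.getD L PySem.Set.empty).contains (PySem.Str.slice s none (some L)) = true
      · rw [if_pos hcont]
        have hA : condA ld s L = true := by
          unfold condA
          rw [Bool.and_eq_true, Bool.not_eq_true', decide_eq_false_iff_not]
          exact ⟨hlt, hcont⟩
        have hdrop := slice_len_lt hs hL1
        have hrec := hcc (PySem.Str.slice s (some L) none) memo hg (by omega)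
        apply ih (fun L' hL' => hsub L' (by simp [hL'])) s _ _ hrec.2 hs hlen
        rw [hSr, hA] at hacc
        rw [hrec.1]
        simp only [if_true] at hacc
        omega
      · rw [if_neg hcont]
        apply ih (fun L' hL' => hsub L' (by simp [hL'])) s acc memo hg hs hlen
        have hA : condA ld s L = false := by
          unfold condA
          rw [Bool.and_eq_false_iff]
          right
          exact Bool.not_eq_true _ ▸ (by simpa using hcont)
        rw [hSr, hA] at hacc
        simpa using hacc

lemma count_constructions_spec (ld : PySem.Dict Int (PySem.Set String)) (hpos : ∀ L ∈ ld.keys, 1 ≤ L) :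
    ∀ (fuel : Nat) (s : String) (memo : PySem.Dict String Int), goodI ld memo →
      s.toList.length < fuel →
      (count_constructions ld fuel s memo).1 = Wc ld s ∧
        goodI ld (count_constructions ld fuel s memo).2 := by
  intro fuel
  induction fuel with
  | zero => intro s memo _ h; omega
  | succ f ih =>
    intro s memo hg hlen
    simp only [count_constructions]
    cases hm : memo.get? s with
    | some v =>
      exact ⟨hg s v hm, hg⟩
    | none =>
      by_cases hs : s = ""
      · subst hs
        rw [if_pos rfl]
        exact ⟨(Wc_empty ld).symm, hg⟩
      · rw [if_neg hs]
        apply count_go_spec ld hpos f (fun s' memo' hg' hl' => ih s' memo' hg' hl')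
          ld.keys (fun _ h => h) s 0 memo hg hs (by have := str_len_pos hs; omega)
        rw [Wc_unfold ld hpos hs]
        omega

-- empty memos are good
lemma goodB_empty (ld : PySem.Dict Int (PySem.Set String)) : goodB ld PySem.Dict.empty := by
  intro k b hk
  rw [PySem.Dict.get?_empty] at hk
  cases hk

lemma goodI_empty (ld : PySem.Dict Int (PySem.Set String)) : goodI ld PySem.Dict.empty := by
  intro k v hk
  rw [PySem.Dict.get?_empty] at hk
  cases hk

-- ---- B's bottom-up DP computes the same Wc ----

-- the suffix request[j:]
def sfx (req : String) (j : Nat) : String := PySem.Str.slice req (some (j:Int)) none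

lemma sfx_toList (req : String) (j : Nat) : (sfx req j).toList = req.toList.drop j := by
  unfold sfx
  rw [toList_slice_from req (by omega)]
  simp

lemma sfx_zero (req : String) : sfx req 0 = req := by
  apply String.toList_inj.mp
  rw [sfx_toList]
  simp

lemma sfx_full (req : String) {j : Nat} (hj : req.toList.length ≤ j) : sfx req j = "" := by
  apply String.toList_inj.mp
  rw [sfx_toList]
  rw [List.drop_eq_nil_iff.mpr hj]
  rfl

lemma sfx_ne_empty (req : String) {j : Nat} (hj : j < req.toList.length) : sfx req j ≠ "" := by
  intro h
  have h2 : req.toList.drop j = [] := by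
    rw [← sfx_toList, h]
    rfl
  rw [List.drop_eq_nil_iff] at h2
  omega

lemma sfx_len (req : String) (j : Nat) : (sfx req j).toList.length = req.toList.length - j := by
  rw [sfx_toList, List.length_drop]

-- the prefix of length L of the suffix at i is the slice request[i:i+L]
lemma sfx_take (req : String) (i : Nat) {L : Int} (hL : 0 ≤ L) :
    PySem.Str.slice (sfx req i) none (some L) =
      PySem.Str.slice req (some (i:Int)) (some ((i:Int) + L)) := by
  apply String.toList_inj.mp
  rw [toList_slice_to _ hL, sfx_toList]
  rw [PySem.Str.toList_slice, PySem.Chars.slice_eq_listSlice]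
  rw [show (i:Int) + L = ((i + L.toNat : Nat) : Int) by push_cast; omega]
  rw [PySem.List.slice_natCast]
  congr 1
  omega

-- dropping L from the suffix at i is the suffix at i + L
lemma sfx_drop (req : String) (i : Nat) {L : Int} (hL : 0 ≤ L) :
    PySem.Str.slice (sfx req i) (some L) none = sfx req (i + L.toNat) := by
  apply String.toList_inj.mp
  rw [toList_slice_from _ hL, sfx_toList, sfx_toList, List.drop_drop]

-- the sorted list of distinct nonempty-pattern lengths used by B
def lensOf (patterns : List String) : List Int :=
  PySem.List.sorted (PySem.Set.ofList ((patterns.filter (fun p => !(p == ""))).map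
    (fun p => PySem.Str.len p))) (fun x => x) false

lemma lengths_mem (patterns : List String) (L : Int) :
    L ∈ lensOf patterns ↔ ∃ p ∈ patterns, p ≠ "" ∧ PySem.Str.len p = L := by
  unfold lensOf
  rw [List.Perm.mem_iff (PySem.List.sorted_perm _ _ _), PySem.Set.mem_ofList]
  simp only [List.mem_map, List.mem_filter]
  constructor
  · rintro ⟨p, ⟨hp, hne⟩, rfl⟩
    exact ⟨p, hp, by simpa using hne, rfl⟩
  · rintro ⟨p, hp, hne, rfl⟩
    exact ⟨p, ⟨hp, by simpa using hne⟩, rfl⟩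

lemma lengths_nodup (patterns : List String) : (lensOf patterns).Nodup :=
  ((PySem.List.sorted_perm _ _ _).nodup_iff).mpr (PySem.Set.nodup_ofList _)

lemma lengths_perm_keys (patterns : List String) (hP : "" ∉ patterns) :
    (lensOf patterns).Perm (constructLengthDictionary patterns PySem.Dict.empty).keys := by
  rw [List.perm_ext_iff_of_nodup (lengths_nodup patterns) (ld_keys_nodup patterns)]
  intro L
  rw [lengths_mem, ld_mem_keys]
  constructor
  · rintro ⟨p, hp, _, hl⟩
    exact ⟨p, hp, hl⟩
  · rintro ⟨p, hp, hl⟩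
    exact ⟨p, hp, fun h => hP (h ▸ hp), hl⟩

lemma lengths_pos (patterns : List String) : ∀ L ∈ lensOf patterns, 1 ≤ L := by
  intro L hL
  rw [lengths_mem] at hL
  obtain ⟨p, _, hne, rfl⟩ := hL
  have := str_len_pos hne
  rw [PySem.Str.len_eq]
  omega

-- sum over a filtered-and-mapped list as a sum of conditional terms
lemma sum_filter_map (l : List Int) (p : Int → Bool) (f : Int → Int) :
    ((l.filter p).map f).sum = (l.map (fun x => if p x then f x else 0)).sum := by
  induction l with
  | nil => rfl
  | cons a l ih =>
    rw [List.filter_cons]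
    by_cases h : p a = true
    · rw [if_pos h, List.map_cons, List.sum_cons, List.map_cons, List.sum_cons, ih, if_pos h]
    · rw [if_neg h, List.map_cons, List.sum_cons, ih, if_neg h, zero_add]

-- B's branch condition agrees with A's, on the suffix at i
lemma cond_eq (patterns : List String) (req : String) (i : Nat)
    (hi : i < req.toList.length) {L : Int} (hL1 : 1 ≤ L) :
    (decide ((i:Int) + L ≤ PySem.Str.len req) &&
      (PySem.Set.ofList patterns).contains (PySem.Str.slice req (some (i:Int)) (some ((i:Int) + L)))) =
    condA (constructLengthDictionary patterns PySem.Dict.empty) (sfx req i) L := by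
  rw [Bool.eq_iff_iff]
  rw [Bool.and_eq_true, decide_eq_true_eq]
  unfold condA
  rw [Bool.and_eq_true, Bool.not_eq_true', decide_eq_false_iff_not]
  have hcontains : ∀ (x : String) (s : PySem.Set String),
      s.contains x = true ↔ x ∈ s := by
    intro x s
    rw [PySem.Set.contains, List.contains_iff_mem]
  constructor
  · rintro ⟨hle, hmem⟩
    rw [PySem.Str.len_eq] at hle
    refine ⟨by rw [PySem.Str.len_eq, sfx_len]; omega, ?_⟩
    rw [hcontains, ld_getD_mem]
    rw [hcontains, PySem.Set.mem_ofList] at hmem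
    rw [sfx_take req i (by omega)]
    refine ⟨hmem, ?_⟩
    rw [PySem.Str.len_eq, PySem.Str.toList_slice, PySem.Chars.slice_eq_listSlice]
    rw [show (i:Int) + L = ((i + L.toNat : Nat) : Int) by push_cast; omega]
    rw [PySem.List.slice_natCast, List.length_take, List.length_drop]
    omega
  · rintro ⟨hge, hmem⟩
    rw [PySem.Str.len_eq, sfx_len] at hge
    refine ⟨by rw [PySem.Str.len_eq]; omega, ?_⟩
    rw [hcontains, ld_getD_mem] at hmem
    rw [hcontains, PySem.Set.mem_ofList]
    rw [sfx_take req i (by omega)] at hmem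
    exact hmem.1

-- the value B writes at position i is the count for the suffix at i
lemma bStep_sum (patterns : List String) (hP : "" ∉ patterns) (req : String) (i : Nat)
    (hi : i < req.toList.length) (dp : List Int)
    (hdp : ∀ j : Nat, i < j → j ≤ req.toList.length →
      PySem.List.pyGetD dp (j:Int) 0 =
        Wc (constructLengthDictionary patterns PySem.Dict.empty) (sfx req j)) :
    (((lensOf patterns).filter (fun L =>
          decide ((i:Int) + L ≤ PySem.Str.len req) &&
          (PySem.Set.ofList patterns).contains
            (PySem.Str.slice req (some (i:Int)) (some ((i:Int) + L))))).map
      (fun L => PySem.List.pyGetD dp ((i:Int) + L) 0)).sum =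
    Wc (constructLengthDictionary patterns PySem.Dict.empty) (sfx req i) := by
  have hpos := ld_keys_pos patterns hP
  have hne := sfx_ne_empty req hi
  rw [Wc_unfold _ hpos hne]
  unfold Sr
  rw [← List.Perm.sum_eq (List.Perm.map _ (lengths_perm_keys patterns hP))]
  rw [sum_filter_map]
  apply congrArg
  apply List.map_congr_left
  intro L hL
  have hL1 := lengths_pos patterns L hL
  rw [cond_eq patterns req i hi hL1]
  by_cases hA : condA (constructLengthDictionary patterns PySem.Dict.empty) (sfx req i) L = true
  · rw [if_pos hA, if_pos hA]
    have hle := (condA_spec hA).1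
    rw [sfx_len] at hle
    rw [show (i:Int) + L = ((i + L.toNat : Nat) : Int) by push_cast; omega]
    rw [hdp (i + L.toNat) (by omega) (by omega)]
    rw [sfx_drop req i (by omega)]
  · rw [if_neg hA, if_neg hA]

lemma pyRange_desc (k : Nat) :
    PySem.List.pyRange (k:Int) (-1) (-1) = (k:Int) :: PySem.List.pyRange ((k:Int) - 1) (-1) (-1) := by
  cases k with
  | zero => rfl
  | succ m =>
    unfold PySem.List.pyRange
    norm_num
    rw [if_pos (by omega : (-1:Int) < (m:Int))]
    rw [show ((m:Int) + 1 + 1).toNat = m + 2 by omega]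
    rw [List.range_succ_eq_map]
    rw [List.map_cons, List.map_map]
    norm_num

lemma pyRange_desc_nil : PySem.List.pyRange (-1 : Int) (-1) (-1) = [] := by
  unfold PySem.List.pyRange
  norm_num

-- one loop step of B advances the invariant
lemma dp_step (patterns : List String) (hP : "" ∉ patterns) (req : String) (i : Nat)
    (hi : i < req.toList.length) (dp : List Int) (hlen : dp.length = req.toList.length + 1)
    (hdp : ∀ j : Nat, i < j → j ≤ req.toList.length →
      PySem.List.pyGetD dp (j:Int) 0 =
        Wc (constructLengthDictionary patterns PySem.Dict.empty) (sfx req j)) :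
    (bStep (PySem.Set.ofList patterns) (lensOf patterns) (PySem.Str.len req) req dp (i:Int)).length
        = req.toList.length + 1 ∧
    ∀ j : Nat, i ≤ j → j ≤ req.toList.length →
      PySem.List.pyGetD
          (bStep (PySem.Set.ofList patterns) (lensOf patterns) (PySem.Str.len req) req dp (i:Int))
          (j:Int) 0 =
        Wc (constructLengthDictionary patterns PySem.Dict.empty) (sfx req j) := by
  unfold bStep
  rw [PySem.List.pySetD_natCast]
  constructor
  · rw [List.length_set, hlen]
  · intro j hij hjlen
    rw [PySem.List.pyGetD_natCast, List.getD_eq_getElem?_getD, List.getElem?_set]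
    by_cases hji : i = j
    · subst hji
      rw [if_pos rfl, if_pos (by omega)]
      simp only [Option.getD_some]
      exact bStep_sum patterns hP req i hi dp hdp
    · rw [if_neg hji]
      rw [← List.getD_eq_getElem?_getD, ← PySem.List.pyGetD_natCast]
      exact hdp j (by omega) hjlen

-- the downward loop fills every position at or below its start
lemma dp_loop (patterns : List String) (hP : "" ∉ patterns) (req : String) :
    ∀ (k : Nat), k < req.toList.length → ∀ (dp : List Int), dp.length = req.toList.length + 1 →
    (∀ j : Nat, k < j → j ≤ req.toList.length →
      PySem.List.pyGetD dp (j:Int) 0 =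
        Wc (constructLengthDictionary patterns PySem.Dict.empty) (sfx req j)) →
    ∀ j : Nat, j ≤ req.toList.length →
      PySem.List.pyGetD ((PySem.List.pyRange (k:Int) (-1) (-1)).foldl
          (bStep (PySem.Set.ofList patterns) (lensOf patterns) (PySem.Str.len req) req) dp)
        (j:Int) 0 =
      Wc (constructLengthDictionary patterns PySem.Dict.empty) (sfx req j) := by
  intro k
  induction k with
  | zero =>
    intro hk dp hlen hdp j hj
    rw [pyRange_desc 0]
    rw [show ((0:Nat):Int) - 1 = (-1 : Int) by norm_num, pyRange_desc_nil]
    rw [List.foldl_cons, List.foldl_nil]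
    have hstep := dp_step patterns hP req 0 hk dp hlen (fun j h1 h2 => hdp j h1 h2)
    exact hstep.2 j (by omega) hj
  | succ m ih =>
    intro hk dp hlen hdp j hj
    rw [pyRange_desc (m + 1)]
    rw [show ((m + 1 : Nat):Int) - 1 = ((m:Nat):Int) by push_cast; ring]
    rw [List.foldl_cons]
    have hstep := dp_step patterns hP req (m + 1) hk dp hlen (fun j h1 h2 => hdp j h1 h2)
    exact ih (by omega) _ hstep.1 (fun j h1 h2 => hstep.2 j (by omega) h2) j hj

-- on an empty request both helpers of A return immediately
lemma canA_empty (ld : PySem.Dict Int (PySem.Set String)) :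
    can_construct ld 1 "" PySem.Dict.empty = (true, PySem.Dict.empty) := by
  simp [can_construct]

lemma cntA_empty (ld : PySem.Dict Int (PySem.Set String)) :
    count_constructions ld 1 "" PySem.Dict.empty = (1, PySem.Dict.empty) := by
  simp [count_constructions]

-- after the whole loop, dp[0] is the count for the full request
lemma dp_final (patterns : List String) (hP : "" ∉ patterns) (req : String) :
    PySem.List.pyGetD ((PySem.List.pyRange (PySem.Str.len req - 1) (-1) (-1)).foldl
        (bStep (PySem.Set.ofList patterns) (lensOf patterns) (PySem.Str.len req) req)
        (PySem.List.pySetD (List.replicate ((PySem.Str.len req).toNat + 1) 0)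
          (PySem.Str.len req) 1))
      0 0 =
    Wc (constructLengthDictionary patterns PySem.Dict.empty) req := by
  have hlen0 : PySem.Str.len req = (req.toList.length : Int) := PySem.Str.len_eq req
  have htoNat : (PySem.Str.len req).toNat = req.toList.length := by rw [hlen0]; omega
  rw [hlen0]
  rw [show ((req.toList.length : Nat) : Int).toNat = req.toList.length by omega]
  rw [show PySem.List.pySetD (List.replicate (req.toList.length + 1) (0:Int))
        ((req.toList.length : Nat) : Int) 1
      = (List.replicate (req.toList.length + 1) (0:Int)).set req.toList.length 1
      from PySem.List.pySetD_natCast _ _ _]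
  have hdp0len : ((List.replicate (req.toList.length + 1) (0:Int)).set req.toList.length 1).length
      = req.toList.length + 1 := by
    rw [List.length_set, List.length_replicate]
  have hdp0 : ∀ j : Nat, j ≤ req.toList.length →
      PySem.List.pyGetD ((List.replicate (req.toList.length + 1) (0:Int)).set req.toList.length 1)
          (j:Int) 0 =
        if j = req.toList.length then 1 else 0 := by
    intro j hj
    rw [PySem.List.pyGetD_natCast, List.getD_eq_getElem?_getD, List.getElem?_set]
    by_cases hjN : j = req.toList.length
    · rw [if_pos hjN.symm, if_pos (by rw [List.length_replicate]; omega)]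
      simp [hjN]
    · rw [if_neg (fun h => hjN h.symm), if_neg hjN]
      rw [List.getElem?_replicate, if_pos (by omega)]
      rfl
  by_cases h0 : req.toList.length = 0
  · rw [show ((req.toList.length : Nat) : Int) - 1 = (-1:Int) by omega]
    rw [pyRange_desc_nil, List.foldl_nil]
    have h1 := hdp0 0 (by omega)
    rw [if_pos (by omega), Nat.cast_zero] at h1
    rw [h1]
    have hreq : req = "" := by
      apply String.toList_inj.mp
      cases h : req.toList with
      | nil => rfl
      | cons a l => rw [h] at h0; simp at h0
    rw [hreq, Wc_empty]
  · rw [show ((req.toList.length : Nat) : Int) - 1 = ((req.toList.length - 1 : Nat) : Int) by omega]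
    have hres := dp_loop patterns hP req (req.toList.length - 1) (by omega)
      ((List.replicate (req.toList.length + 1) (0:Int)).set req.toList.length 1)
      hdp0len
      (fun j h1 h2 => by
        have hjN : j = req.toList.length := by omega
        rw [hdp0 j h2, if_pos hjN, hjN, sfx_full req (by omega), Wc_empty])
      0 (by omega)
    rw [Nat.cast_zero, sfx_zero] at hres
    rw [PySem.Str.len_eq] at hres
    exact hres



-- ===== VERDICT (by name: the statement is the Claim_ definition above) =====
theorem full_count_spec : Claim_equal_full_count := by
  intro patterns requests _ hpre
  unfold Spec_full_count
  unfold full_count full_count_alt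
  apply List.foldl_ext
  intro ct req hreq
  dsimp only
  by_cases hP : "" ∈ patterns
  · -- every request is empty; both sides count it as one arrangement
    have hempty : req = "" := hpre hP req hreq
    subst hempty
    rw [show ("".toList.length + 1) = 1 from rfl, canA_empty, cntA_empty]
    rfl
  · have hpos := ld_keys_pos patterns hP
    have hcan := (can_construct_spec (constructLengthDictionary patterns PySem.Dict.empty) hpos
      (req.toList.length + 1) req PySem.Dict.empty (goodB_empty _) (by omega)).1
    have hcnt := (count_constructions_spec (constructLengthDictionary patterns PySem.Dict.empty) hpos
      (req.toList.length + 1) req PySem.Dict.empty (goodI_empty _) (by omega)).1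
    have hdp := dp_final patterns hP req
    rw [show lensOf patterns = PySem.List.sorted (PySem.Set.ofList
        ((patterns.filter (fun p => !(p == ""))).map (fun p => PySem.Str.len p)))
        (fun x => x) false from rfl] at hdp
    rw [hcan, hcnt, hdp]
    by_cases hW : 0 < Wc (constructLengthDictionary patterns PySem.Dict.empty) req
    · simp [hW]
    · simp [hW]
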